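-- pv_equiv track=rewrite | github.com/acronicsM/visa-map2 | scripts/rss_monitor.py | extract_countries
-- ===== SOURCE A (Python) =====
-- def extract_countries(
--     title: str,
--     description: str,
--     country_names: dict,
-- ) -> list[str]:
--     """Извлекает iso2 коды стран из текста"""
--     text = f"{title} {description}".lower()
--     found = set()
--     for name, iso2 in country_names.items():
--         if len(name) < 4:
--             continue
--         if name in text:
--             found.add(iso2)
--     return sorted(found)
-- ===== SOURCE B (Python) =====
-- def extract_countries(
--     title: str,
--     description: str,
--     country_names: dict,
-- ) -> list[str]:
--     """Извлекает iso2 коды стран из текста"""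
--     text = (title + " " + description).lower()
--     n = len(text)
--     # text-driven search: enumerate every window of each needed length once,
--     # then each name is a single set lookup instead of a substring scan
--     lengths = {len(name) for name in country_names if len(name) >= 4}
--     windows = {L: {text[i:i + L] for i in range(n - L + 1)} for L in lengths}
--     found = {iso2 for name, iso2 in country_names.items()
--              if len(name) >= 4 and name in windows[len(name)]}
--     return sorted(found)
-- ===== Notes on version B (the rewrite author's own statement) =====
-- stated objective: faster
-- what changed: Pattern-driven substring search (one 'name in text' scan per country) is replaced by a text-driven scan: for each needed pattern length the set of all text windows of that length is built once, and every name is then a single set lookup.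
import Mathlib
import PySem

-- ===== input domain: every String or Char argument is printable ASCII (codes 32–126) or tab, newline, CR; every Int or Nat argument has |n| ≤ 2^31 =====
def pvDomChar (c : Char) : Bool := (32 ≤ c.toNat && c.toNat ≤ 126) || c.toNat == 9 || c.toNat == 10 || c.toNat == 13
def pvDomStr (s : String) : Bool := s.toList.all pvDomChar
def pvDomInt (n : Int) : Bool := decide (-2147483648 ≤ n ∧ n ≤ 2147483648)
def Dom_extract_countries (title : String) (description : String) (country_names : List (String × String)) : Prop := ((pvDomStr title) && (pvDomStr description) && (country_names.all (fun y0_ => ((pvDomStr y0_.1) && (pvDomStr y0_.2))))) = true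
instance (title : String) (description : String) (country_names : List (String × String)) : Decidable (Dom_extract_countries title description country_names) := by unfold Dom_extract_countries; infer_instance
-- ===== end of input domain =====

-- ===== PORT A =====
-- B replaces per-name substring scans by a per-length window-set of the text; proved to return the same sorted iso2 list.
def extract_countries (title : String) (description : String) (country_names : List (String × String)) : List String :=
  let text := PySem.Chars.lower (title.toList ++ ' ' :: description.toList)
  let found : PySem.Set String :=
    (PySem.Dict.ofList country_names).items.foldl (fun s p =>
      if PySem.Str.len p.1 < 4 then s
      else if PySem.Chars.isIn p.1.toList text then PySem.Set.add s p.2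
      else s) PySem.Set.empty
  PySem.List.sorted found (fun x => x) false

-- ===== PORT B =====
-- the set {text[i:i+L] for i in range(n - L + 1)} of Source B
def pvWindows (text : List Char) (n L : Int) : PySem.Set (List Char) :=
  PySem.Set.ofList ((PySem.List.pyRange 0 (n - L + 1)).map
    (fun i => PySem.List.slice text (some i) (some (i + L))))

def extract_countries_alt (title : String) (description : String) (country_names : List (String × String)) : List String :=
  let text := PySem.Chars.lower (title.toList ++ ' ' :: description.toList)
  let n : Int := (text.length : Int)
  let d := PySem.Dict.ofList country_names
  let lengths : PySem.Set Int :=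
    PySem.Set.ofList ((d.keys.filter (fun name => 4 ≤ PySem.Str.len name)).map
      (fun name => PySem.Str.len name))
  let windows : PySem.Dict Int (PySem.Set (List Char)) :=
    lengths.foldl (fun w L => w.insert L (pvWindows text n L)) PySem.Dict.empty
  let found : PySem.Set String :=
    d.items.foldl (fun s p =>
      if 4 ≤ PySem.Str.len p.1 then
        -- windows[len(name)]: the key is always present (len(name) ∈ lengths), so getD's default is never used
        if (windows.getD (PySem.Str.len p.1) PySem.Set.empty).contains p.1.toList then
          PySem.Set.add s p.2
        else s
      else s) PySem.Set.empty
  PySem.List.sorted found (fun x => x) false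

-- ===== PRECONDITION & SPEC =====
def Spec_extract_countries (title : String) (description : String) (country_names : List (String × String)) (out : List String) : Prop := out = extract_countries_alt title description country_names
instance (title : String) (description : String) (country_names : List (String × String)) (out : List String) : Decidable (Spec_extract_countries title description country_names out) := by unfold Spec_extract_countries; infer_instance

-- ===== CLAIM (what is proved, stated in full; the proofs are below) =====
def Claim_equal_extract_countries : Prop := ∀ (title : String) (description : String) (country_names : List (String × String)), Dom_extract_countries title description country_names → Spec_extract_countries title description country_names (extract_countries title description country_names)

-- ===== LEMMAS AND PROOFS =====

theorem pv_getD_fold_insert_not_mem {V : Type} (f : Int → V) (dflt : V) (ls : List Int)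
    (d : PySem.Dict Int V) (L : Int) (h : L ∉ ls) :
    (ls.foldl (fun w L' => w.insert L' (f L')) d).getD L dflt = d.getD L dflt := by
  induction ls generalizing d with
  | nil => rfl
  | cons a t ih =>
      simp only [List.foldl_cons]
      rw [ih _ (by simp_all), PySem.Dict.getD_insert_of_ne _ _ _ (by simp_all)]

theorem pv_getD_fold_insert_mem {V : Type} (f : Int → V) (dflt : V) (ls : List Int)
    (d : PySem.Dict Int V) (L : Int) (h : L ∈ ls) :
    (ls.foldl (fun w L' => w.insert L' (f L')) d).getD L dflt = f L := by
  induction ls generalizing d with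
  | nil => simp at h
  | cons a t ih =>
      simp only [List.foldl_cons]
      by_cases ht : L ∈ t
      · exact ih _ ht
      · have ha : L = a := by simp_all
        subst ha
        rw [pv_getD_fold_insert_not_mem _ _ _ _ _ ht, PySem.Dict.getD_insert_self]

theorem pv_window_iff (text name : List Char) (hne : name ≠ []) :
    (pvWindows text (text.length : Int) (name.length : Int)).contains name
      = PySem.Chars.isIn name text := by
  rw [Bool.eq_iff_iff, PySem.Set.contains_iff, ← PySem.Chars.exists_prefix_drop_iff_isIn]
  unfold pvWindows
  rw [PySem.Set.mem_ofList, List.mem_map]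
  constructor
  · rintro ⟨i, hi, hslice⟩
    rw [PySem.List.mem_pyRange_one] at hi
    obtain ⟨h0, _⟩ := hi
    have hj : i = ((i.toNat : Nat) : Int) := (Int.toNat_of_nonneg h0).symm
    rw [hj, PySem.List.slice_natCast_add] at hslice
    exact ⟨i.toNat, List.prefix_iff_eq_take.mpr hslice.symm⟩
  · rintro ⟨j, hpre⟩
    have hlen : name.length ≤ (text.drop j).length := hpre.length_le
    have hpos : 0 < name.length := List.length_pos_iff.mpr hne
    simp only [List.length_drop] at hlen
    refine ⟨(j : Int), ?_, ?_⟩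
    · rw [PySem.List.mem_pyRange_one]
      constructor <;> [positivity; omega]
    · rw [PySem.List.slice_natCast_add]
      exact (List.prefix_iff_eq_take.mp hpre).symm

-- ===== VERDICT (by name: the statement is the Claim_ definition above) =====
theorem extract_countries_spec : Claim_equal_extract_countries := by
  intro title description country_names _
  unfold Spec_extract_countries extract_countries extract_countries_alt
  dsimp only
  congr 1
  apply PySem.List.foldl_congr_mem
  intro acc p hp
  set text := PySem.Chars.lower (title.toList ++ ' ' :: description.toList) with htext
  set d := PySem.Dict.ofList country_names with hd
  by_cases hsmall : PySem.Str.len p.1 < 4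
  · rw [if_pos hsmall, if_neg (not_le.mpr hsmall)]
  · have hbig : 4 ≤ PySem.Str.len p.1 := not_lt.mp hsmall
    have hmem : PySem.Str.len p.1 ∈
        PySem.Set.ofList ((d.keys.filter (fun name => 4 ≤ PySem.Str.len name)).map
          (fun name => PySem.Str.len name)) := by
      rw [PySem.Set.mem_ofList, List.mem_map]
      exact ⟨p.1, List.mem_filter.mpr ⟨PySem.Dict.mem_keys_of_mem_items d hp, by simpa using hbig⟩, rfl⟩
    have hne : p.1.toList ≠ [] := by
      rw [PySem.Str.len_eq] at hbig
      intro h; rw [h] at hbig; simp at hbig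
    rw [if_neg hsmall, if_pos hbig,
      pv_getD_fold_insert_mem (fun L => pvWindows text (text.length : Int) L) _ _ _ _ hmem,
      PySem.Str.len_eq, pv_window_iff text p.1.toList hne]
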